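-- pv_equiv track=rewrite | github.com/gangueboris/AoC_ | AoC_24/D4/p1.py | HoriVert
-- ===== SOURCE A (Python) =====
-- def HoriVert(line, word):
--     l = 0
--     count = 0
--     reWord = word[::-1]
--
--     for r in range(1, len(line)):
--         if line[r] == 'X':
--             l = r
--         if word in line[l: r+1]:
--             l = r
--             count += 1
--     l = 0
--     for r in range(1, len(line)):
--         if line[r] == 'S':
--             l = r
--         if reWord in line[l: r+1]:
--             l = r
--             count += 1
--
--     return count
-- ===== SOURCE B (Python) =====
-- def _occurrences(line, w):
--     m = len(w)
--     return [i for i in range(len(line) - m + 1) if line[i:i+m] == w]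
--
--
-- def _count_pass(line, w, reset_char):
--     occs = _occurrences(line, w)
--     m = len(w)
--     l = 0
--     j = 0
--     count = 0
--     for r in range(1, len(line)):
--         if line[r] == reset_char:
--             l = r
--             while j < len(occs) and occs[j] < l:
--                 j += 1
--         if j < len(occs) and occs[j] + m <= r + 1:
--             l = r
--             count += 1
--             while j < len(occs) and occs[j] < l:
--                 j += 1
--     return count
--
--
-- def HoriVert(line, word):
--     return _count_pass(line, word, 'X') + _count_pass(line, word[::-1], 'S')
-- ===== Notes on version B (the rewrite author's own statement) =====
-- stated objective: faster
-- what changed: B precomputes the sorted list of occurrence start positions of the word (and of its reverse) once, then replays the reset logic in a single linear pass with a pointer into that list, instead of A's re-slicing and re-searching the whole window at every index.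
import Mathlib
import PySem

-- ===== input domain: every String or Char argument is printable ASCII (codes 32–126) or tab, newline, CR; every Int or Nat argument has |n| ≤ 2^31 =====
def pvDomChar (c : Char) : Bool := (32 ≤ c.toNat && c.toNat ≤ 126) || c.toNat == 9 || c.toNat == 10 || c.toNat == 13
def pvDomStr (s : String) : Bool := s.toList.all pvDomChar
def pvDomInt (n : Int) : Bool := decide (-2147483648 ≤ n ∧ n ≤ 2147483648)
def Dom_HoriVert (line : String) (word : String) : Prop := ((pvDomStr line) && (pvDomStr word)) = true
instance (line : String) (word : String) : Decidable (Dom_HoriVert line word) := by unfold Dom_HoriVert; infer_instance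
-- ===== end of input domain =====

-- B replaces A's repeated substring scans over reset windows by one precomputed occurrence
-- list per direction plus a pointer-based simulation of the reset logic (objective: faster).


-- ===== PORT A =====
-- A's two for-loops are textually identical up to (word, reset char); stepA is that shared loop body.
def stepA (L W : List Char) (c : Char) (s : Int × Int) (r : Int) : Int × Int :=
  let l := if PySem.List.pyGetD L r ' ' == c then r else s.1
  if PySem.Chars.isIn W (PySem.List.slice L (some l) (some (r + 1))) then (r, s.2 + 1)
  else (l, s.2)

def HoriVert (line : String) (word : String) : Int :=
  let L := line.toList
  let W := word.toList
  let reWord := (PySem.List.slice? W none none (-1)).getD []  -- word[::-1]; step -1 ≠ 0, never none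
  let s1 := (PySem.List.pyRange 1 (L.length : Int) 1).foldl (stepA L W 'X') (0, 0)
  let s2 := (PySem.List.pyRange 1 (L.length : Int) 1).foldl (stepA L reWord 'S') (0, s1.2)
  s2.2

-- ===== PORT B =====
-- _occurrences: starts of all occurrences of w in line, ascending.
def altOccs (L W : List Char) : List Int :=
  (PySem.List.pyRange 0 ((L.length : Int) - W.length + 1) 1).filter
    (fun i => PySem.List.slice L (some i) (some (i + (W.length : Int))) == W)

-- loop body of _count_pass; the pointer j into occs is carried as the remaining suffix occs[j:],
-- so the two 'while j < len(occs) and occs[j] < l: j += 1' loops become dropWhile on that suffix.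
def stepB (L : List Char) (m : Int) (c : Char) (s : Int × List Int × Int) (r : Int) :
    Int × List Int × Int :=
  let t := if PySem.List.pyGetD L r ' ' == c then
             (r, s.2.1.dropWhile (fun o => decide (o < r)))
           else (s.1, s.2.1)
  match t.2 with
  | [] => (t.1, t.2, s.2.2)
  | o :: _ =>
      if o + m ≤ r + 1 then (r, t.2.dropWhile (fun o => decide (o < r)), s.2.2 + 1)
      else (t.1, t.2, s.2.2)

def countPass (L W : List Char) (c : Char) : Int :=
  ((PySem.List.pyRange 1 (L.length : Int) 1).foldl (stepB L (W.length : Int) c)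
    (0, altOccs L W, 0)).2.2

def HoriVert_alt (line : String) (word : String) : Int :=
  let L := line.toList
  let W := word.toList
  let reWord := (PySem.List.slice? W none none (-1)).getD []
  countPass L W 'X' + countPass L reWord 'S'

-- ===== PRECONDITION & SPEC =====
def Spec_HoriVert (line : String) (word : String) (out : Int) : Prop := out = HoriVert_alt line word
instance (line : String) (word : String) (out : Int) : Decidable (Spec_HoriVert line word out) := by unfold Spec_HoriVert; infer_instance

-- ===== CLAIM (what is proved, stated in full; the proofs are below) =====
def Claim_equal_HoriVert : Prop := ∀ (line : String) (word : String), Dom_HoriVert line word → Spec_HoriVert line word (HoriVert line word)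

-- ===== LEMMAS AND PROOFS =====

-- membership in B's occurrence list = "W occurs in L at start o"
lemma mem_altOccs (L W : List Char) (o : Int) :
    o ∈ altOccs L W ↔ 0 ≤ o ∧ o + W.length ≤ (L.length : Int) ∧
      (L.drop o.toNat).take W.length = W := by
  unfold altOccs
  rw [List.mem_filter, PySem.List.mem_pyRange_one, beq_iff_eq]
  constructor
  · rintro ⟨⟨h0, hlt⟩, hsl⟩
    rw [PySem.List.slice_toNat L h0 (by omega)] at hsl
    have : ((o + (W.length : Int)).toNat - o.toNat) = W.length := by omega
    rw [this] at hsl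
    exact ⟨h0, by omega, hsl⟩
  · rintro ⟨h0, hle, hsl⟩
    refine ⟨⟨h0, by omega⟩, ?_⟩
    rw [PySem.List.slice_toNat L h0 (by omega)]
    have : ((o + (W.length : Int)).toNat - o.toNat) = W.length := by omega
    rw [this]; exact hsl

lemma sorted_altOccs (L W : List Char) : (altOccs L W).Pairwise (· < ·) :=
  (PySem.List.pairwise_lt_pyRange_one 0 ((L.length : Int) - W.length + 1)).filter _

lemma dropWhile_lt_dropWhile_lt (xs : List Int) (l r : Int) (h : l ≤ r) :
    (xs.dropWhile (fun o => decide (o < l))).dropWhile (fun o => decide (o < r)) =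
      xs.dropWhile (fun o => decide (o < r)) := by
  induction xs with
  | nil => rfl
  | cons x xs ih =>
    by_cases hx : x < l
    · simp only [List.dropWhile_cons, hx, decide_true, if_pos, decide_eq_true_eq]
      rw [ih]
      simp [show x < r by omega]
    · simp [List.dropWhile_cons, hx]

lemma mem_dropWhile_lt (xs : List Int) (hs : xs.Pairwise (· < ·)) (l o : Int) :
    o ∈ xs.dropWhile (fun x => decide (x < l)) ↔ o ∈ xs ∧ l ≤ o := by
  induction xs with
  | nil => simp
  | cons x xs ih =>
    have hx' := List.Pairwise.of_cons hs
    by_cases hx : x < l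
    · rw [List.dropWhile_cons]
      simp only [hx, decide_true, if_pos]
      rw [ih hx']
      constructor
      · rintro ⟨hm, hlo⟩; exact ⟨List.mem_cons_of_mem _ hm, hlo⟩
      · rintro ⟨hm, hlo⟩
        rcases List.mem_cons.1 hm with rfl | hm
        · omega
        · exact ⟨hm, hlo⟩
    · rw [List.dropWhile_cons]
      simp only [hx, decide_false, if_neg, Bool.false_eq_true, not_false_iff]
      constructor
      · intro hm
        rcases List.mem_cons.1 hm with rfl | hm
        · exact ⟨List.mem_cons_self, by omega⟩
        · have := (List.pairwise_cons.1 hs).1 o hm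
          exact ⟨List.mem_cons_of_mem _ hm, by omega⟩
      · rintro ⟨hm, _⟩; exact hm

lemma dropWhile_lt_zero_altOccs (L W : List Char) :
    (altOccs L W).dropWhile (fun o => decide (o < (0 : Int))) = altOccs L W := by
  cases h : altOccs L W with
  | nil => rfl
  | cons x xs =>
    have hx : x ∈ altOccs L W := by rw [h]; exact List.mem_cons_self
    have h0 : 0 ≤ x := ((mem_altOccs L W x).1 hx).1
    rw [List.dropWhile_cons]
    simp [show ¬ x < (0:Int) by omega]

-- A's window test "word in line[l:r+1]" = "some occurrence starts in [l, r+1-len(word)]"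
lemma isIn_slice_iff (L W : List Char) (l r : Int) (hl0 : 0 ≤ l) (hlr : l ≤ r)
    (hr : r < (L.length : Int)) :
    PySem.Chars.isIn W (PySem.List.slice L (some l) (some (r + 1))) = true ↔
      ∃ o ∈ altOccs L W, l ≤ o ∧ o + W.length ≤ r + 1 := by
  rw [PySem.List.slice_toNat L hl0 (by omega), ← PySem.Chars.exists_prefix_drop_iff_isIn]
  set a := l.toNat with ha
  set t := (r + 1).toNat - l.toNat with ht
  constructor
  · rintro ⟨j, hj⟩
    rw [List.drop_take, List.drop_drop] at hj
    rw [List.prefix_take_iff] at hj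
    obtain ⟨hpre, hlen⟩ := hj
    rcases le_or_gt j t with hjt | hjt
    · refine ⟨l + j, ?_, by omega, by omega⟩
      rw [mem_altOccs]
      refine ⟨by omega, by omega, ?_⟩
      have : (l + (j : Int)).toNat = a + j := by omega
      rw [this]
      exact (List.prefix_iff_eq_take.1 hpre).symm
    · -- j past the window end forces W = []
      have hW : W.length = 0 := by omega
      refine ⟨l, ?_, by omega, by omega⟩
      rw [mem_altOccs]
      refine ⟨by omega, by omega, ?_⟩
      rw [hW]
      simp [List.eq_nil_of_length_eq_zero hW]
  · rintro ⟨o, hmem, hlo, hor⟩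
    rw [mem_altOccs] at hmem
    obtain ⟨h0, hle, htake⟩ := hmem
    refine ⟨o.toNat - a, ?_⟩
    rw [List.drop_take, List.drop_drop]
    have hd : a + (o.toNat - a) = o.toNat := by omega
    rw [hd]
    rw [List.prefix_take_iff]
    constructor
    · exact htake ▸ List.take_prefix W.length (L.drop o.toNat)
    · omega

-- one loop iteration preserves the simulation relation between A's and B's states
lemma step_rel (L W : List Char) (c : Char) (l cnt : Int) (r : Int)
    (hl0 : 0 ≤ l) (hlr : l ≤ r) (hr : r < (L.length : Int)) :
    stepB L (W.length : Int) c (l, (altOccs L W).dropWhile (fun o => decide (o < l)), cnt) r =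
      ((stepA L W c (l, cnt) r).1,
        (altOccs L W).dropWhile (fun o => decide (o < (stepA L W c (l, cnt) r).1)),
        (stepA L W c (l, cnt) r).2) ∧
      0 ≤ (stepA L W c (l, cnt) r).1 ∧ (stepA L W c (l, cnt) r).1 ≤ r + 1 := by
  have hsorted := sorted_altOccs L W
  by_cases hx : (PySem.List.pyGetD L r ' ' == c) = true
  all_goals
    simp only [stepA, stepB, hx, if_pos, if_neg, Bool.false_eq_true, not_false_iff]
  · rw [dropWhile_lt_dropWhile_lt _ _ _ hlr]
    rcases hdw : (altOccs L W).dropWhile (fun o => decide (o < r)) with _ | ⟨o, rest'⟩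
    · have hcond : PySem.Chars.isIn W (PySem.List.slice L (some r) (some (r + 1))) = false := by
        rw [Bool.eq_false_iff, Ne, isIn_slice_iff L W r r (by omega) le_rfl hr]
        rintro ⟨o, hm, hlo, _⟩
        have : o ∈ (altOccs L W).dropWhile (fun x => decide (x < r)) :=
          (mem_dropWhile_lt _ hsorted r o).2 ⟨hm, hlo⟩
        rw [hdw] at this; simp at this
      rw [hcond]
      simp only [Bool.false_eq_true, if_false]
      exact ⟨by simp [hdw], by omega, by omega⟩
    · have hmem : o ∈ altOccs L W ∧ r ≤ o := by
        have : o ∈ (altOccs L W).dropWhile (fun x => decide (x < r)) := by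
          rw [hdw]; exact List.mem_cons_self
        exact (mem_dropWhile_lt _ hsorted r o).1 this
      by_cases ho : o + (W.length : Int) ≤ r + 1
      · have hcond : PySem.Chars.isIn W (PySem.List.slice L (some r) (some (r + 1))) = true :=
          (isIn_slice_iff L W r r (by omega) le_rfl hr).2 ⟨o, hmem.1, hmem.2, ho⟩
        rw [hcond]
        simp only [if_true]
        simp only [ho, if_pos]
        rw [← hdw, dropWhile_lt_dropWhile_lt _ _ _ le_rfl]
        refine ⟨rfl, by omega, by omega⟩
      · have hcond : PySem.Chars.isIn W (PySem.List.slice L (some r) (some (r + 1))) = false := by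
          rw [Bool.eq_false_iff, Ne, isIn_slice_iff L W r r (by omega) le_rfl hr]
          rintro ⟨x, hm, hlx, hxr⟩
          have hxdw : x ∈ (altOccs L W).dropWhile (fun y => decide (y < r)) :=
            (mem_dropWhile_lt _ hsorted r x).2 ⟨hm, hlx⟩
          rw [hdw] at hxdw
          rcases List.mem_cons.1 hxdw with rfl | hxm
          · omega
          · have hsorted' : ((altOccs L W).dropWhile (fun y => decide (y < r))).Pairwise (· < ·) :=
              hsorted.sublist (List.dropWhile_sublist _)
            rw [hdw] at hsorted'
            have := (List.pairwise_cons.1 hsorted').1 x hxm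
            omega
        rw [hcond]
        simp only [Bool.false_eq_true, if_false]
        exact ⟨by simp [ho, hdw], by omega, by omega⟩
  · rcases hdw : (altOccs L W).dropWhile (fun o => decide (o < l)) with _ | ⟨o, rest'⟩
    · have hcond : PySem.Chars.isIn W (PySem.List.slice L (some l) (some (r + 1))) = false := by
        rw [Bool.eq_false_iff, Ne, isIn_slice_iff L W l r hl0 hlr hr]
        rintro ⟨o, hm, hlo, _⟩
        have : o ∈ (altOccs L W).dropWhile (fun x => decide (x < l)) :=
          (mem_dropWhile_lt _ hsorted l o).2 ⟨hm, hlo⟩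
        rw [hdw] at this; simp at this
      rw [hcond]
      simp only [Bool.false_eq_true, if_false]
      exact ⟨by simp [hdw], by omega, by omega⟩
    · have hmem : o ∈ altOccs L W ∧ l ≤ o := by
        have : o ∈ (altOccs L W).dropWhile (fun x => decide (x < l)) := by
          rw [hdw]; exact List.mem_cons_self
        exact (mem_dropWhile_lt _ hsorted l o).1 this
      by_cases ho : o + (W.length : Int) ≤ r + 1
      · have hcond : PySem.Chars.isIn W (PySem.List.slice L (some l) (some (r + 1))) = true :=
          (isIn_slice_iff L W l r hl0 hlr hr).2 ⟨o, hmem.1, hmem.2, ho⟩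
        rw [hcond]
        simp only [if_true]
        simp only [ho, if_pos]
        rw [← hdw, dropWhile_lt_dropWhile_lt _ _ _ hlr]
        exact ⟨rfl, by omega, by omega⟩
      · have hcond : PySem.Chars.isIn W (PySem.List.slice L (some l) (some (r + 1))) = false := by
          rw [Bool.eq_false_iff, Ne, isIn_slice_iff L W l r hl0 hlr hr]
          rintro ⟨x, hm, hlx, hxr⟩
          have hxdw : x ∈ (altOccs L W).dropWhile (fun y => decide (y < l)) :=
            (mem_dropWhile_lt _ hsorted l x).2 ⟨hm, hlx⟩
          rw [hdw] at hxdw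
          rcases List.mem_cons.1 hxdw with rfl | hxm
          · omega
          · have hsorted' : ((altOccs L W).dropWhile (fun y => decide (y < l))).Pairwise (· < ·) :=
              hsorted.sublist (List.dropWhile_sublist _)
            rw [hdw] at hsorted'
            have := (List.pairwise_cons.1 hsorted').1 x hxm
            omega
        rw [hcond]
        simp only [Bool.false_eq_true, if_false]
        exact ⟨by simp [ho, hdw], by omega, by omega⟩

lemma pass_eq_aux (L W : List Char) (c : Char) :
    ∀ (fuel : Nat) (r0 l cnt : Int), (L.length : Int) - r0 ≤ fuel → 0 ≤ l → l ≤ r0 →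
      ((PySem.List.pyRange r0 (L.length : Int) 1).foldl (stepA L W c) (l, cnt)).2 =
      ((PySem.List.pyRange r0 (L.length : Int) 1).foldl (stepB L (W.length : Int) c)
        (l, (altOccs L W).dropWhile (fun o => decide (o < l)), cnt)).2.2 := by
  intro fuel
  induction fuel with
  | zero =>
    intro r0 l cnt hf _ _
    rw [PySem.List.pyRange_one_eq_nil (by omega)]
    rfl
  | succ f ih =>
    intro r0 l cnt hf hl0 hlr
    by_cases hend : (L.length : Int) ≤ r0
    · rw [PySem.List.pyRange_one_eq_nil hend]; rfl
    · rw [PySem.List.pyRange_one_cons (by omega), List.foldl_cons, List.foldl_cons]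
      obtain ⟨hB, h0, hle⟩ := step_rel L W c l cnt r0 hl0 hlr (by omega)
      rw [hB]
      rcases hA : stepA L W c (l, cnt) r0 with ⟨l', cnt'⟩
      rw [hA] at h0 hle
      exact ih (r0 + 1) l' cnt' (by omega) h0 hle

-- A's count accumulator is a pure offset (the branches never read it)
lemma stepA_offset (L W : List Char) (c : Char) :
    ∀ (fuel : Nat) (r0 l cnt : Int), (L.length : Int) - r0 ≤ fuel →
      ((PySem.List.pyRange r0 (L.length : Int) 1).foldl (stepA L W c) (l, cnt)).2 =
      cnt + ((PySem.List.pyRange r0 (L.length : Int) 1).foldl (stepA L W c) (l, 0)).2 := by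
  intro fuel
  induction fuel with
  | zero =>
    intro r0 l cnt hf
    rw [PySem.List.pyRange_one_eq_nil (by omega)]
    simp
  | succ f ih =>
    intro r0 l cnt hf
    by_cases hend : (L.length : Int) ≤ r0
    · rw [PySem.List.pyRange_one_eq_nil hend]; simp
    · rw [PySem.List.pyRange_one_cons (by omega), List.foldl_cons, List.foldl_cons]
      have hsplit : ∃ l' d, stepA L W c (l, cnt) r0 = (l', cnt + d) ∧
          stepA L W c (l, 0) r0 = (l', d) := by
        unfold stepA
        by_cases h1 : PySem.Chars.isIn W (PySem.List.slice L
            (some (if PySem.List.pyGetD L r0 ' ' == c then r0 else l)) (some (r0 + 1))) = true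
        · exact ⟨r0, 1, by simp only [h1, if_true], by simp only [h1, if_true, zero_add]⟩
        · rw [Bool.not_eq_true] at h1
          exact ⟨(if PySem.List.pyGetD L r0 ' ' == c then r0 else l), 0,
            by simp only [h1, Bool.false_eq_true, if_false, add_zero],
            by simp only [h1, Bool.false_eq_true, if_false]⟩
      obtain ⟨l', d, hA1, hA2⟩ := hsplit
      rw [hA1, hA2, ih (r0+1) l' (cnt+d) (by omega), ih (r0+1) l' d (by omega)]
      ring

lemma pass_eq (L W : List Char) (c : Char) :
    ((PySem.List.pyRange 1 (L.length : Int) 1).foldl (stepA L W c) (0, 0)).2 =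
      countPass L W c := by
  unfold countPass
  rw [pass_eq_aux L W c L.length 1 0 0 (by omega) le_rfl (by omega),
    dropWhile_lt_zero_altOccs]

-- ===== VERDICT (by name: the statement is the Claim_ definition above) =====
theorem HoriVert_spec : Claim_equal_HoriVert := by
  intro line word _
  show HoriVert line word = HoriVert_alt line word
  unfold HoriVert HoriVert_alt
  dsimp only
  rw [stepA_offset line.toList ((PySem.List.slice? word.toList none none (-1)).getD []) 'S'
      line.toList.length 1 0 _ (by omega)]
  rw [pass_eq line.toList word.toList 'X',
    pass_eq line.toList ((PySem.List.slice? word.toList none none (-1)).getD []) 'S']
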